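-- pv_equiv track=rewrite | github.com/linus123/PythonPractice | src/10041_VitosFamily/vitos_family.py | chase_direction
-- ===== SOURCE A (Python) =====
-- def chase_direction(average, min_distance, numbers, direction):
--     diff_counter = 2 * direction
--     current_target = average + diff_counter
--     current_dist = calculate_distances(numbers, current_target)
--     while current_dist <= min_distance:
--         min_distance = current_dist
--         diff_counter += direction
--         current_target = average + diff_counter
--         current_dist = calculate_distances(numbers, current_target)
--     return min_distance
--
-- def calculate_distances(numbers: list, target: int) -> int:
--     sum_of_distances = 0
--
--     for number in numbers:
--         distance = abs(number - target)
--         sum_of_distances += distance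
--
--     return sum_of_distances
-- ===== SOURCE B (Python) =====
-- def chase_direction(average, min_distance, numbers, direction):
--     # Sort once and build prefix sums; each distance-sum query is then a
--     # binary search plus arithmetic rather than a full scan.
--     s = sorted(numbers)
--     n = len(s)
--     prefix = [0]
--     acc = 0
--     for x in s:
--         acc += x
--         prefix.append(acc)
--     total = acc
--
--     def dist(target):
--         j = _bisect_left(s, target)
--         below = prefix[j]
--         return target * j - below + (total - below) - target * (n - j)
--
--     diff_counter = 2 * direction
--     current_dist = dist(average + diff_counter)
--     while current_dist <= min_distance:
--         min_distance = current_dist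
--         diff_counter += direction
--         current_dist = dist(average + diff_counter)
--     return min_distance
--
--
-- def _bisect_left(s, x):
--     lo, hi = 0, len(s)
--     while lo < hi:
--         mid = (lo + hi) // 2
--         if s[mid] < x:
--             lo = mid + 1
--         else:
--             hi = mid
--     return lo
-- ===== Notes on version B (the rewrite author's own statement) =====
-- stated objective: alternative
-- what changed: B sorts the numbers once and builds prefix sums, so each step of the hill-climbing walk evaluates the sum of absolute distances by a binary search plus arithmetic instead of A's full rescan of the list; it trades a one-time sort for cheaper walk steps.
import Mathlib
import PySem

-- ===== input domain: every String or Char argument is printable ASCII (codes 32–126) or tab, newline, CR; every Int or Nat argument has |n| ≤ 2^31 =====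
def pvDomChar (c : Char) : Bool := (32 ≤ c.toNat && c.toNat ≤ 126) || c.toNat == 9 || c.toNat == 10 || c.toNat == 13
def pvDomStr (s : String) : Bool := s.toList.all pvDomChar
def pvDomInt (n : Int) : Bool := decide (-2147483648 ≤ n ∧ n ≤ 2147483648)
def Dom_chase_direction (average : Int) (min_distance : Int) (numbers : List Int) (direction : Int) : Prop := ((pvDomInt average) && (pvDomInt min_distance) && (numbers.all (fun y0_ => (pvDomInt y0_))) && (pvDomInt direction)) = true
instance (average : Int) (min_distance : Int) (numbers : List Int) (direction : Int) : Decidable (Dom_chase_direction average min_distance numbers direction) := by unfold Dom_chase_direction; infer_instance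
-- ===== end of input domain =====

-- Alternative algorithm: B replaces A's per-step full rescan of the numbers by a one-time
-- sort + prefix sums and a binary-search query per walk step (same hill-climbing walk, same
-- return value; it trades a one-time sort for cheaper steps, not measured faster overall).
-- On inputs where the walk never worsens (e.g. direction = 0 or numbers = [] with the first
-- distance ≤ min_distance) both Pythons loop forever identically; the fuelled ports agree there too.

-- ===== PORT A =====
def pvCalcDist (numbers : List Int) (target : Int) : Int :=
  numbers.foldl (fun sum_of_distances number => sum_of_distances + |number - target|) 0

def pvChaseLoopA (average : Int) (direction : Int) (numbers : List Int) :
    Nat → Int → Int → Int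
  | 0, min_distance, _ => min_distance
  | fuel+1, min_distance, diff_counter =>
      let current_dist := pvCalcDist numbers (average + diff_counter)
      if current_dist ≤ min_distance then
        pvChaseLoopA average direction numbers fuel current_dist (diff_counter + direction)
      else min_distance

def chase_direction (average : Int) (min_distance : Int) (numbers : List Int) (direction : Int) : Int :=
  pvChaseLoopA average direction numbers 1099511627776 min_distance (2 * direction)

-- ===== PORT B =====
-- `prefix` list and running total, built by Source B's accumulation loop
def pvPrefix (s : List Int) : List Int × Int :=
  s.foldl (fun p x => (p.1 ++ [p.2 + x], p.2 + x)) ([0], 0)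

-- Source B's dist(target): binary search (= bisect_left's loop, PySem.List.bisectLeft) + prefix-sum formula
def pvBDist (s : List Int) (pre : List Int) (total : Int) (n : Nat) (target : Int) : Int :=
  let j := PySem.List.bisectLeft s target
  let below := PySem.List.pyGetD pre (j : Int) 0
  target * (j : Int) - below + (total - below) - target * ((n : Int) - (j : Int))

def pvChaseLoopB (average : Int) (direction : Int) (s : List Int) (pre : List Int)
    (total : Int) (n : Nat) : Nat → Int → Int → Int
  | 0, min_distance, _ => min_distance
  | fuel+1, min_distance, diff_counter =>
      let current_dist := pvBDist s pre total n (average + diff_counter)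
      if current_dist ≤ min_distance then
        pvChaseLoopB average direction s pre total n fuel current_dist (diff_counter + direction)
      else min_distance

def chase_direction_alt (average : Int) (min_distance : Int) (numbers : List Int) (direction : Int) : Int :=
  let s := PySem.List.sorted numbers (fun x => x) false
  let pa := pvPrefix s
  pvChaseLoopB average direction s pa.1 pa.2 s.length 1099511627776 min_distance (2 * direction)

-- ===== PRECONDITION & SPEC =====
def Spec_chase_direction (average : Int) (min_distance : Int) (numbers : List Int) (direction : Int) (out : Int) : Prop := out = chase_direction_alt average min_distance numbers direction
instance (average : Int) (min_distance : Int) (numbers : List Int) (direction : Int) (out : Int) : Decidable (Spec_chase_direction average min_distance numbers direction out) := by unfold Spec_chase_direction; infer_instance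

-- ===== CLAIM (what is proved, stated in full; the proofs are below) =====
def Claim_equal_chase_direction : Prop := ∀ (average : Int) (min_distance : Int) (numbers : List Int) (direction : Int), Dom_chase_direction average min_distance numbers direction → Spec_chase_direction average min_distance numbers direction (chase_direction average min_distance numbers direction)

-- ===== LEMMAS AND PROOFS =====

-- the prefix loop builds the list of partial sums, and its accumulator is the total sum
theorem pvPrefix_foldl (s : List Int) : ∀ (out : List Int) (acc : Int),
    s.foldl (fun (p : List Int × Int) x => (p.1 ++ [p.2 + x], p.2 + x)) (out, acc)
      = (out ++ (List.range s.length).map (fun k => acc + (s.take (k+1)).sum), acc + s.sum) := by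
  induction s with
  | nil => intro out acc; simp
  | cons x xs ih =>
      intro out acc
      simp only [List.foldl_cons]
      rw [ih]
      simp only [Prod.mk.injEq]
      refine ⟨?_, by simp [List.sum_cons]; ring⟩
      rw [List.length_cons, List.range_succ_eq_map, List.map_cons, List.map_map,
        List.append_assoc, List.singleton_append]
      congr 1
      simp only [Function.comp, List.take_succ_cons, List.sum_cons, List.take_zero,
        List.sum_nil, List.cons.injEq, List.map_inj_left, List.mem_range]
      refine ⟨by ring, ?_⟩
      intro k _
      ring

theorem pvPrefix_eq (s : List Int) :
    pvPrefix s = ((List.range (s.length + 1)).map (fun k => (s.take k).sum), s.sum) := by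
  unfold pvPrefix
  rw [pvPrefix_foldl]
  simp [Prod.mk.injEq, List.range_succ_eq_map, List.map_map, Function.comp]

theorem pvPrefix_getD (s : List Int) (j : Nat) (hj : j ≤ s.length) :
    PySem.List.pyGetD (pvPrefix s).1 (j : Int) 0 = (s.take j).sum := by
  rw [pvPrefix_eq]
  rw [PySem.List.pyGetD_natCast]
  rw [List.getD_eq_getElem?_getD]
  have hlt : j < ((List.range (s.length + 1)).map (fun k => (s.take k).sum)).length := by
    simpa using Nat.lt_succ_of_le hj
  rw [List.getElem?_eq_getElem hlt]
  simp

-- sum of (t - x) over a list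
theorem sum_map_sub_left (t : Int) (u : List Int) :
    (u.map (fun x => t - x)).sum = u.length * t - u.sum := by
  induction u with
  | nil => simp
  | cons x xs ih => simp [ih]; ring

theorem sum_map_sub_right (t : Int) (u : List Int) :
    (u.map (fun x => x - t)).sum = u.sum - u.length * t := by
  induction u with
  | nil => simp
  | cons x xs ih => simp [ih]; ring

-- the prefix-sum/binary-search query equals A's full scan, for every target
theorem pvBDist_eq (numbers : List Int) (t : Int) :
    pvBDist (PySem.List.sorted numbers (fun x => x) false)
      (pvPrefix (PySem.List.sorted numbers (fun x => x) false)).1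
      (pvPrefix (PySem.List.sorted numbers (fun x => x) false)).2
      (PySem.List.sorted numbers (fun x => x) false).length t
      = pvCalcDist numbers t := by
  set s := PySem.List.sorted numbers (fun x => x) false with hs
  have hpair : List.Pairwise (· ≤ ·) s := by
    simpa using PySem.List.sorted_pairwise numbers (fun x => x)
  obtain ⟨hjle, hlt, hge⟩ := PySem.List.bisectLeft_spec s t hpair
  set j := PySem.List.bisectLeft s t with hj
  -- A's scan as a sum over the sorted list
  have hA : pvCalcDist numbers t = (s.map (fun x => |x - t|)).sum := by
    unfold pvCalcDist
    rw [PySem.List.foldl_add]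
    have hperm : (numbers.map (fun x => |x - t|)).Perm (s.map (fun x => |x - t|)) :=
      ((PySem.List.sorted_perm numbers (fun x => x) false).map _).symm
    simpa using hperm.sum_eq
  -- split at the bisect point
  have hsplit : s = s.take j ++ s.drop j := (List.take_append_drop j s).symm
  have htake : ∀ x ∈ s.take j, x < t := by
    intro x hx
    obtain ⟨i, hi, rfl⟩ := List.mem_iff_getElem.mp hx
    have hi' : i < j := by simp [List.length_take] at hi; omega
    have hin : i < s.length := lt_of_lt_of_le hi' hjle
    have := hlt i hin hi'
    simpa [List.getElem_take] using this
  have hdrop : ∀ x ∈ s.drop j, t ≤ x := by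
    intro x hx
    obtain ⟨i, hi, rfl⟩ := List.mem_iff_getElem.mp hx
    have hin : j + i < s.length := by
      have := List.length_drop (l := s) (i := j); omega
    have := hge (j + i) hin (Nat.le_add_right j i)
    simpa [List.getElem_drop] using this
  have htsum : ((s.take j).map (fun x => |x - t|)).sum = ((s.take j).map (fun x => t - x)).sum := by
    apply congrArg List.sum
    apply List.map_congr_left
    intro x hx
    have := htake x hx
    rw [abs_of_neg (by omega)]
    ring
  have hdsum : ((s.drop j).map (fun x => |x - t|)).sum = ((s.drop j).map (fun x => x - t)).sum := by
    apply congrArg List.sum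
    apply List.map_congr_left
    intro x hx
    have := hdrop x hx
    rw [abs_of_nonneg (by omega)]
  have hlentake : (s.take j).length = j := by simp [Nat.min_eq_left hjle]
  have hlendrop : (s.drop j).length = s.length - j := by simp
  have hsum : s.sum = (s.take j).sum + (s.drop j).sum := by
    conv_lhs => rw [hsplit]
    simp
  unfold pvBDist
  dsimp only
  rw [pvPrefix_getD s j hjle]
  have hpre2 : (pvPrefix s).2 = s.sum := by rw [pvPrefix_eq]
  rw [hpre2, hA]
  conv_rhs => rw [hsplit]
  rw [List.map_append, List.sum_append, htsum, hdsum, sum_map_sub_left, sum_map_sub_right,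
    hlentake, hlendrop, hsum]
  have hcast : ((s.length - j : Nat) : Int) = (s.length : Int) - (j : Int) := by
    omega
  rw [hcast]
  ring

-- the two walks agree step for step
theorem loops_eq (average direction : Int) (numbers : List Int) :
    ∀ (fuel : Nat) (min_distance diff_counter : Int),
      pvChaseLoopA average direction numbers fuel min_distance diff_counter
        = pvChaseLoopB average direction (PySem.List.sorted numbers (fun x => x) false)
            (pvPrefix (PySem.List.sorted numbers (fun x => x) false)).1
            (pvPrefix (PySem.List.sorted numbers (fun x => x) false)).2
            (PySem.List.sorted numbers (fun x => x) false).length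
            fuel min_distance diff_counter := by
  intro fuel
  induction fuel with
  | zero => intro md dc; rfl
  | succ n ih =>
      intro md dc
      simp only [pvChaseLoopA, pvChaseLoopB, pvBDist_eq]
      split <;> simp [ih]

-- ===== VERDICT (by name: the statement is the Claim_ definition above) =====
theorem chase_direction_spec : Claim_equal_chase_direction := by
  intro average min_distance numbers direction _
  unfold Spec_chase_direction chase_direction chase_direction_alt
  exact loops_eq average direction numbers _ min_distance (2 * direction)
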